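-- pv_equiv track=rewrite | github.com/proAhmedUcv/erpnext-arabic-full-translation | scripts/extract_untranslated.py | _decode_po_string
-- ===== SOURCE A (Python) =====
-- def _decode_po_string(s: str) -> str:
--     """Unescape and join PO string (handles \\n, \\t, \\", etc.)."""
--     if not s:
--         return ""
--     # PO: "line1\\n" "line2" -> line1\nline2; unescape backslash sequences
--     out: list[str] = []
--     i = 0
--     while i < len(s):
--         if s[i] == "\\" and i + 1 < len(s):
--             n = s[i + 1]
--             if n == "n":
--                 out.append("\n")
--             elif n == "t":
--                 out.append("\t")
--             elif n == "r":
--                 out.append("\r")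
--             elif n == '"':
--                 out.append('"')
--             elif n == "\\":
--                 out.append("\\")
--             else:
--                 out.append(s[i : i + 2])
--             i += 2
--         else:
--             out.append(s[i])
--             i += 1
--     return "".join(out)
-- ===== SOURCE B (Python) =====
-- import re
--
-- _ESCAPES = {"n": "\n", "t": "\t", "r": "\r", '"': '"', "\\": "\\"}
--
-- def _decode_po_string(s: str) -> str:
--     """Unescape and join PO string (handles \\n, \\t, \\", etc.)."""
--     return re.sub(r"\\(.)", lambda m: _ESCAPES.get(m.group(1), m.group(0)), s, flags=re.DOTALL)
-- ===== Notes on version B (the rewrite author's own statement) =====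
-- stated objective: idiomatic
-- what changed: Replaces the hand-written index loop with its if/elif chain and output list by a single re.sub over the pattern \\(.) whose replacement function looks the escape letter up in a table, defaulting to the full two-character match for unknown escapes.
import Mathlib
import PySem

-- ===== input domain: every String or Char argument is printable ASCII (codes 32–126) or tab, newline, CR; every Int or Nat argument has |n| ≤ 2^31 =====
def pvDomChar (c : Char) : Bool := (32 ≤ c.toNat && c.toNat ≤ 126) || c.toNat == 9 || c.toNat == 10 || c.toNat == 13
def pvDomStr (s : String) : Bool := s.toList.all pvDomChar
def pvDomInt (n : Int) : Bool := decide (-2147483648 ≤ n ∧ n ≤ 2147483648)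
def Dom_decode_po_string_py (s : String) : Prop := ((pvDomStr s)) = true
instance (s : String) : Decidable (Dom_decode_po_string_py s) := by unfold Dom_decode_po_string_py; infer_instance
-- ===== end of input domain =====

-- B replaces A's hand-written index loop and if/elif chain by a single regex
-- substitution driven by an escape table (more idiomatic); return value only.

-- ===== PORT A =====
-- A's while loop over the index i: at each step it looks at the head character
-- and, for a backslash with a following character, the if/elif chain picks the
-- replacement; results are collected in a list `out` and joined at the end.
def pvLoopA : List Char → List String
  | [] => []
  | '\\' :: n :: rest =>
      (if n = 'n' then "\n"
       else if n = 't' then "\t"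
       else if n = 'r' then "\r"
       else if n = '"' then "\""
       else if n = '\\' then "\\"
       else String.ofList ['\\', n]) :: pvLoopA rest
  | c :: rest => String.ofList [c] :: pvLoopA rest

def decode_po_string_py (s : String) : String :=
  if s = "" then "" else PySem.Str.join "" (pvLoopA s.toList)

-- ===== PORT B =====
-- B's escape table, as a dict (association list).
def pvEscapes : PySem.Dict Char String :=
  PySem.Dict.mk [('n', "\n"), ('t', "\t"), ('r', "\r"), ('"', "\""), ('\\', "\\")]

-- re.sub(r"\\(.)", repl, s): scan for a backslash followed by any character,
-- replace the match by the table entry (default: the full match); the regex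
-- engine does not re-scan replacements, so we continue after the match.
def pvSubB : List Char → List Char
  | '\\' :: c :: rest => (pvEscapes.getD c (String.ofList ['\\', c])).toList ++ pvSubB rest
  | c :: rest => c :: pvSubB rest
  | [] => []

def decode_po_string_py_alt (s : String) : String := String.ofList (pvSubB s.toList)

-- ===== PRECONDITION & SPEC =====
def Spec_decode_po_string_py (s : String) (out : String) : Prop := out = decode_po_string_py_alt s
instance (s : String) (out : String) : Decidable (Spec_decode_po_string_py s out) := by unfold Spec_decode_po_string_py; infer_instance

-- ===== CLAIM (what is proved, stated in full; the proofs are below) =====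
def Claim_equal_decode_po_string_py : Prop := ∀ (s : String), Dom_decode_po_string_py s → Spec_decode_po_string_py s (decode_po_string_py s)

-- ===== LEMMAS AND PROOFS =====
theorem pvJoin_empty_cons (p : List Char) (rest : List (List Char)) :
    PySem.Chars.join [] (p :: rest) = p ++ PySem.Chars.join [] rest := by
  cases rest with
  | nil => simp [PySem.Chars.join_singleton, PySem.Chars.join_nil]
  | cons q r => simp [PySem.Chars.join_cons_cons]

theorem pvSubB_cons_of_ne (c : Char) (rest : List Char)
    (h : ∀ (n : Char) (r : List Char), c = '\\' → rest = n :: r → False) :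
    pvSubB (c :: rest) = c :: pvSubB rest := by
  rw [pvSubB.eq_def]
  split
  · next n r heq => injection heq with h1 h2; exact ((h n r h1 h2)).elim
  · next heq => injection heq with h1 h2; rw [h1, h2]
  · next heq => exact absurd heq (by simp)

theorem pvLoopA_toList (cs : List Char) :
    (PySem.Str.join "" (pvLoopA cs)).toList = pvSubB cs := by
  induction cs using pvLoopA.induct with
  | case1 => simp [pvLoopA, pvSubB, PySem.Str.toList_join, PySem.Chars.join_nil]
  | case2 n rest ih =>
      simp only [pvLoopA, pvSubB, PySem.Str.toList_join, List.map_cons] at *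
      rw [show ("" : String).toList = [] from rfl] at *
      rw [pvJoin_empty_cons, ih]
      split_ifs with h1 h2 h3 h4 h5
      · subst h1; simp [pvEscapes, PySem.Dict.getD, PySem.Dict.get?]
      · subst h2; simp [pvEscapes, PySem.Dict.getD, PySem.Dict.get?]
      · subst h3; simp [pvEscapes, PySem.Dict.getD, PySem.Dict.get?]
      · subst h4; simp [pvEscapes, PySem.Dict.getD, PySem.Dict.get?]
      · subst h5; simp [pvEscapes, PySem.Dict.getD, PySem.Dict.get?]
      · simp [pvEscapes, PySem.Dict.getD, PySem.Dict.get?, Ne.symm h1, Ne.symm h2,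
          Ne.symm h3, Ne.symm h4, Ne.symm h5, String.ofList]
  | case3 c rest h ih =>
      rw [pvSubB_cons_of_ne c rest h]
      simp only [pvLoopA, PySem.Str.toList_join, List.map_cons] at *
      rw [show ("" : String).toList = [] from rfl] at *
      rw [pvJoin_empty_cons, ih]
      simp

-- ===== VERDICT (by name: the statement is the Claim_ definition above) =====
theorem decode_po_string_py_spec : Claim_equal_decode_po_string_py := by
  intro s _
  unfold Spec_decode_po_string_py decode_po_string_py decode_po_string_py_alt
  split
  · next h => subst h; rfl
  · have := pvLoopA_toList s.toList
    calc PySem.Str.join "" (pvLoopA s.toList)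
        = String.ofList (PySem.Str.join "" (pvLoopA s.toList)).toList := by
          rw [String.ofList_toList]
      _ = String.ofList (pvSubB s.toList) := by rw [this]
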